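-- pv_equiv track=rewrite | github.com/austinProGit/scheduler | src/schedule_inspector.py | senior_with_2000_level_count
-- ===== SOURCE A (Python) =====
-- def schedule_length(schedule):
--     return len(schedule)
--
-- def semester_type_sequence(schedule):
--     SEMESTER_TYPE_SUCCESSOR = {'Fa': 'Sp', 'Sp': 'Su', 'Su': 'Fa'}
--     sequence = None
--     previous_season = 'Su'
--     if schedule_length(schedule) > 0:
--         sequence = []
--         for semester in schedule:
--             sequence.append(SEMESTER_TYPE_SUCCESSOR[previous_season])
--             previous_season = SEMESTER_TYPE_SUCCESSOR[previous_season]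
--     return sequence
--
-- def last_semester_type(schedule):
--     semester_types = semester_type_sequence(schedule)
--     if semester_types != None:
--         return semester_types[-1]
--     else: return None
--
-- def senior_interval(schedule):
--     last_type = last_semester_type(schedule)
--     if last_type == 'Su':
--         return -3
--     if last_type == 'Sp':
--         return -2
--     if last_type == 'Fa':
--         return -1
--
-- def senior_year_semesters_list(schedule):
--     if schedule == None or schedule == [] or schedule == [[]]:
--         return None
--     senior_semesters = []
--     index = senior_interval(schedule)
--     for i in range(index, 0):
--         for semester in schedule[i]:
--             senior_semesters.append(semester)
--     return senior_semesters
--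
-- def senior_with_2000_level_count(schedule):
--     message = ''
--     count = 0
--     senior_year = senior_year_semesters_list(schedule)
--     if senior_year != None:
--         for course in senior_year:
--             if ' 2' in course:
--                 count += 1
--                 message += '2000 level course ' + course + ' detected in senior year.\n'
--     return count, message
-- ===== SOURCE B (Python) =====
-- def senior_with_2000_level_count(schedule):
--     if not schedule:
--         return 0, ''
--     k = (len(schedule) - 1) % 3 + 1
--     hits = [c for sem in schedule[-k:] for c in sem if ' 2' in c]
--     msg = ''.join('2000 level course ' + c + ' detected in senior year.\n' for c in hits)
--     return len(hits), msg
-- ===== Notes on version B (the rewrite author's own statement) =====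
-- stated objective: simpler
-- what changed: B computes the number of senior-year semesters arithmetically ((len-1) % 3 + 1) instead of building the full season sequence, slices off just those semesters, and derives count and message from one filtered list instead of a running (count, message) pair accumulator.
import Mathlib
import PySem

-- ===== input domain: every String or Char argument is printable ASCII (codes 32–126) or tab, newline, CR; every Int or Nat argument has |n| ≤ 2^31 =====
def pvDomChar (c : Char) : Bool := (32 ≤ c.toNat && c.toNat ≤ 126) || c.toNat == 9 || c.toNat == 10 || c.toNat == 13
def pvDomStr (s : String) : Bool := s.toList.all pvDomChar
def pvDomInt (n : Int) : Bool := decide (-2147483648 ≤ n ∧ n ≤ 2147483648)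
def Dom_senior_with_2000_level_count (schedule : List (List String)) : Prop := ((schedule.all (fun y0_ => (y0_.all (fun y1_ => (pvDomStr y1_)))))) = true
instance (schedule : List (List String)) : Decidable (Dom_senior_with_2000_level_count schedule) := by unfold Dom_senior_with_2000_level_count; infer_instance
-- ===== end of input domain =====

-- B replaces A's full season-sequence construction by closed-form arithmetic on the length and a slice of the senior semesters (objective: simpler).

-- ===== PORT A =====
def pvSuccessor (s : String) : String :=
  ((PySem.Dict.ofList [("Fa", "Sp"), ("Sp", "Su"), ("Su", "Fa")]).get? s).getD ""

def pvStsLoop : List (List String) → String → List String → List String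
  | [], _, seq => seq
  | _ :: rest, prev, seq => pvStsLoop rest (pvSuccessor prev) (seq ++ [pvSuccessor prev])

def semester_type_sequence (schedule : List (List String)) : Option (List String) :=
  if schedule.length > 0 then some (pvStsLoop schedule "Su" []) else none

def last_semester_type (schedule : List (List String)) : Option String :=
  match semester_type_sequence schedule with
  | some ts => some (PySem.List.pyGetD ts (-1) "")   -- ts is nonempty whenever this branch runs
  | none => none

def senior_interval (schedule : List (List String)) : Option Int :=
  match last_semester_type schedule with
  | some "Su" => some (-3)
  | some "Sp" => some (-2)
  | some "Fa" => some (-1)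
  | _ => none

def senior_year_semesters_list (schedule : List (List String)) : Option (List String) :=
  if schedule = [] ∨ schedule = [[]] then none
  else
    let index := (senior_interval schedule).getD 0   -- always some in this branch
    some ((PySem.List.pyRange index 0 1).foldl
      (fun acc i => acc ++ PySem.List.pyGetD schedule i []) [])

def senior_with_2000_level_count (schedule : List (List String)) : Int × String :=
  match senior_year_semesters_list schedule with
  | none => (0, "")
  | some senior_year =>
    senior_year.foldl
      (fun (p : Int × String) course =>
        if PySem.Str.isIn " 2" course then
          (p.1 + 1, p.2 ++ ("2000 level course " ++ course ++ " detected in senior year.\n"))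
        else p)
      (0, "")

-- ===== PORT B =====
def pvMsg (c : String) : String := "2000 level course " ++ c ++ " detected in senior year.\n"

def senior_with_2000_level_count_alt (schedule : List (List String)) : Int × String :=
  if schedule = [] then (0, "")
  else
    let k : Int := PySem.Int.mod ((schedule.length : Int) - 1) 3 + 1
    let hits := (PySem.List.slice schedule (some (-k)) none).flatMap
      (fun sem => sem.filter (fun c => PySem.Str.isIn " 2" c))
    ((hits.length : Int), PySem.Str.join "" (hits.map pvMsg))

-- ===== PRECONDITION & SPEC =====
def Spec_senior_with_2000_level_count (schedule : List (List String)) (out : Int × String) : Prop := out = senior_with_2000_level_count_alt schedule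
instance (schedule : List (List String)) (out : Int × String) : Decidable (Spec_senior_with_2000_level_count schedule out) := by unfold Spec_senior_with_2000_level_count; infer_instance

-- ===== CLAIM (what is proved, stated in full; the proofs are below) =====
def Claim_equal_senior_with_2000_level_count : Prop := ∀ (schedule : List (List String)), Dom_senior_with_2000_level_count schedule → Spec_senior_with_2000_level_count schedule (senior_with_2000_level_count schedule)

-- ===== LEMMAS AND PROOFS =====

-- the seasons produced by A's loop, without the accumulator
def pvSeqOf : List (List String) → String → List String
  | [], _ => []
  | _ :: rest, prev => pvSuccessor prev :: pvSeqOf rest (pvSuccessor prev)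

-- iterated successor
def pvIter : Nat → String → String
  | 0, s => s
  | n + 1, s => pvIter n (pvSuccessor s)

theorem pvStsLoop_eq_seqOf (l : List (List String)) (prev : String) (seq : List String) :
    pvStsLoop l prev seq = seq ++ pvSeqOf l prev := by
  induction l generalizing prev seq with
  | nil => simp [pvStsLoop, pvSeqOf]
  | cons x rest ih => simp [pvStsLoop, pvSeqOf, ih]

theorem pvSeqOf_length (l : List (List String)) (prev : String) :
    (pvSeqOf l prev).length = l.length := by
  induction l generalizing prev with
  | nil => rfl
  | cons x rest ih => simp [pvSeqOf, ih]

theorem pvSeqOf_getLast? (l : List (List String)) (prev : String) (h : l ≠ []) :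
    (pvSeqOf l prev).getLast? = some (pvIter l.length prev) := by
  induction l generalizing prev with
  | nil => exact absurd rfl h
  | cons x rest ih =>
    cases rest with
    | nil => simp [pvSeqOf, pvIter]
    | cons y r =>
      rw [pvSeqOf, pvSeqOf, List.getLast?_cons_cons, ← pvSeqOf, ih (pvSuccessor prev) (by simp)]
      rfl

theorem pvIter_su (n : Nat) :
    pvIter n "Su" = if n % 3 = 0 then "Su" else if n % 3 = 1 then "Fa" else "Sp" := by
  induction n using Nat.strong_induction_on with
  | _ n ih =>
    match n with
    | 0 => rfl
    | 1 => rfl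
    | 2 => rfl
    | (m + 3) =>
      have h3 : pvIter (m + 3) "Su" = pvIter m "Su" := rfl
      rw [h3, ih m (by omega), Nat.add_mod_right]

-- the last semester type, in closed form
theorem pvLast_closed (schedule : List (List String)) (h : schedule ≠ []) :
    last_semester_type schedule = some (pvIter schedule.length "Su") := by
  have hn : 0 < schedule.length := List.length_pos_iff.mpr h
  have hne : pvSeqOf schedule "Su" ≠ [] := by
    intro hc
    have hl := pvSeqOf_length schedule "Su"
    rw [hc] at hl; simp at hl; omega
  unfold last_semester_type semester_type_sequence
  rw [if_pos hn, pvStsLoop_eq_seqOf]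
  simp only [List.nil_append]
  rw [PySem.List.pyGetD_neg_one _ _ hne]
  have hlast := pvSeqOf_getLast? schedule "Su" h
  rw [List.getLast?_eq_some_getLast (h := hne)] at hlast
  rw [hlast]

-- senior interval in closed form
theorem pvInterval_closed (schedule : List (List String)) (h : schedule ≠ []) :
    senior_interval schedule = some (-(((schedule.length - 1) % 3 + 1 : Nat) : Int)) := by
  have hn : 0 < schedule.length := List.length_pos_iff.mpr h
  unfold senior_interval
  rw [pvLast_closed schedule h, pvIter_su]
  rcases h0 : schedule.length % 3 with _ | _ | j
  · have : ((schedule.length - 1) % 3 + 1 : Nat) = 3 := by omega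
    rw [this]; norm_num
  · have : ((schedule.length - 1) % 3 + 1 : Nat) = 1 := by omega
    rw [this]; norm_num
  · have hj : j = 0 := by omega
    subst hj
    have : ((schedule.length - 1) % 3 + 1 : Nat) = 2 := by omega
    rw [this]; norm_num

-- A's range-fold collects exactly the last k semesters, flattened
theorem pvRangeFold (schedule : List (List String)) (k : Nat) (hk : k ≤ schedule.length) :
    (PySem.List.pyRange (-(k : Int)) 0 1).foldl
      (fun acc i => acc ++ PySem.List.pyGetD schedule i []) []
      = (schedule.drop (schedule.length - k)).flatten := by
  suffices hgen : ∀ (k : Nat), k ≤ schedule.length → ∀ (acc : List String),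
      (PySem.List.pyRange (-(k : Int)) 0 1).foldl
        (fun acc i => acc ++ PySem.List.pyGetD schedule i []) acc
        = acc ++ (schedule.drop (schedule.length - k)).flatten by
    simpa using hgen k hk []
  clear hk
  intro k
  induction k with
  | zero =>
    intro _ acc
    simp
  | succ j ihj =>
    intro hk acc
    have hcons : PySem.List.pyRange (-((j + 1 : Nat) : Int)) 0 1
        = (-((j + 1 : Nat) : Int)) :: PySem.List.pyRange (-(j : Int)) 0 1 := by
      rw [PySem.List.pyRange_one_cons (by push_cast; omega),
        show (-((j + 1 : Nat) : Int)) + 1 = -(j : Int) from by push_cast; ring]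
    rw [hcons]
    simp only [List.foldl_cons]
    rw [ihj (by omega) _]
    have hidx : PySem.List.pyGetD schedule (-((j + 1 : Nat) : Int)) []
        = schedule[schedule.length - (j + 1)]'(by omega) := by
      exact PySem.List.pyGetD_neg_natCast schedule (j + 1) [] (by omega) (by omega)
    have hdrop : schedule.drop (schedule.length - (j + 1))
        = schedule[schedule.length - (j + 1)]'(by omega) :: schedule.drop (schedule.length - j) := by
      have h1 : schedule.length - (j + 1) + 1 = schedule.length - j := by omega
      rw [List.drop_eq_getElem_cons (by omega), h1]
    rw [hidx, hdrop]
    simp [List.flatten_cons, List.append_assoc]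

-- join with empty separator unfolds one element at a time
theorem pvJoin_cons (a : String) (r : List String) :
    PySem.Str.join "" (a :: r) = a ++ PySem.Str.join "" r := by
  cases r with
  | nil =>
    simp [PySem.Str.join, PySem.Chars.join_singleton, PySem.Chars.join_nil]
  | cons b r' =>
    simp [PySem.Str.join, PySem.Chars.join_cons_cons]

-- A's pair accumulator equals (count, joined messages) of the filtered list
theorem pvFoldPair (l : List String) (c : Int) (m : String) :
    l.foldl
      (fun (p : Int × String) course =>
        if PySem.Str.isIn " 2" course then
          (p.1 + 1, p.2 ++ ("2000 level course " ++ course ++ " detected in senior year.\n"))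
        else p)
      (c, m)
      = (c + ((l.filter (fun x => PySem.Str.isIn " 2" x)).length : Int),
         m ++ PySem.Str.join "" ((l.filter (fun x => PySem.Str.isIn " 2" x)).map pvMsg)) := by
  induction l generalizing c m with
  | nil => simp [PySem.Str.join, PySem.Chars.join_nil]
  | cons x rest ih =>
    by_cases hx : PySem.Str.isIn " 2" x = true
    · rw [List.filter_cons_of_pos (by simpa using hx), List.map_cons, pvJoin_cons]
      simp only [List.foldl_cons, if_pos hx]
      rw [ih]
      simp only [pvMsg]
      simp only [Prod.mk.injEq]
      refine ⟨by simp only [List.length_cons]; push_cast; ring, ?_⟩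
      rw [String.append_assoc]
    · rw [List.filter_cons_of_neg (by simpa using hx)]
      simp only [List.foldl_cons, if_neg hx]
      exact ih c m

-- ===== VERDICT (by name: the statement is the Claim_ definition above) =====
theorem senior_with_2000_level_count_spec : Claim_equal_senior_with_2000_level_count := by
  intro schedule _
  unfold Spec_senior_with_2000_level_count
  by_cases hnil : schedule = []
  · subst hnil; rfl
  by_cases hone : schedule = [[]]
  · subst hone; rfl
  -- main case
  unfold senior_with_2000_level_count senior_with_2000_level_count_alt senior_year_semesters_list
  rw [if_neg (by simp [hnil, hone]), if_neg hnil]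
  have hn : 0 < schedule.length := List.length_pos_iff.mpr hnil
  set k : Nat := (schedule.length - 1) % 3 + 1 with hkdef
  have hkn : k ≤ schedule.length := by omega
  rw [pvInterval_closed schedule hnil]
  simp only [Option.getD_some]
  rw [pvRangeFold schedule k hkn]
  -- B side: the Int k equals the Nat k
  have hbk : PySem.Int.mod ((schedule.length : Int) - 1) 3 + 1 = (k : Int) := by
    have : ((schedule.length : Int) - 1) = ((schedule.length - 1 : Nat) : Int) := by omega
    rw [this]
    rw [show ((3 : Int)) = ((3 : Nat) : Int) from rfl, PySem.Int.mod_natCast]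
    push_cast; omega
  rw [hbk, PySem.List.slice_from_neg_natCast (xs := schedule) (k := k) (by omega)]
  -- both sides now talk about schedule.drop (schedule.length - k)
  rw [pvFoldPair]
  have hflat : ∀ (ls : List (List String)),
      (ls.flatten.filter (fun x => PySem.Str.isIn " 2" x))
        = ls.flatMap (fun sem => sem.filter (fun c => PySem.Str.isIn " 2" c)) := by
    intro ls; simp [List.filter_flatten, List.flatMap_def]
  rw [hflat]
  simp
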